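-- pv_equiv track=rewrite | github.com/tokumaru-y/competitive_program_python | select_problems_100/full_search/4.py | solve
-- ===== SOURCE A (Python) =====
-- def solve(n,m,sings):
--     res=0
--     for i in range(m):
--         for j in range(i+1,m):
--             tmp=0
--             for line in range(n):
--                 tmp+=max(sings[line][i],sings[line][j])
--             else:
--                 res=max(res,tmp)
--     return res
-- ===== SOURCE B (Python) =====
-- def solve(n, m, sings):
--     # Row-outer decomposition: maintain a table of running sums indexed by column pairs.
--     pairs = [(i, j) for i in range(m) for j in range(i + 1, m)]
--     acc = [0] * len(pairs)
--     for row in sings[:max(n, 0)]: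
--         acc = [a + max(row[i], row[j]) for a, (i, j) in zip(acc, pairs)]
--     best = 0
--     for v in acc:
--         best = max(best, v)
--     return best
-- ===== Notes on version B (the rewrite author's own statement) =====
-- stated objective: alternative
-- what changed: Flipped the loop nesting: instead of finishing each column pair with an inner scan over all rows, B makes one pass over the rows maintaining a pair-indexed table of running sums, then takes the maximum of the table (defaulting to 0).
import Mathlib
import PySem

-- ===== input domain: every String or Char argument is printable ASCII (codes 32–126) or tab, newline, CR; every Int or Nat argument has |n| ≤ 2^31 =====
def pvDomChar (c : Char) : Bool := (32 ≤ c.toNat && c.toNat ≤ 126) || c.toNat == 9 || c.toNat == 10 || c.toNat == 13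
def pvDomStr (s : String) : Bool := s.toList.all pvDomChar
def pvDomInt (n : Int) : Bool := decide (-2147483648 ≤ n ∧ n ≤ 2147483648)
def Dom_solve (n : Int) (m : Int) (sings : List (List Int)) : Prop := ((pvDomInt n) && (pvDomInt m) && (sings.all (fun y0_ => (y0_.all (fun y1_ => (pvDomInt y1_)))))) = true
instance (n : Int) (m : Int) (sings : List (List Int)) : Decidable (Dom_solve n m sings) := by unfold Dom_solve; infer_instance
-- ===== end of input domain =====

-- B flips A's loop nesting: one pass over the rows maintaining a pair-indexed table of
-- running sums, then the maximum of the table (objective: alternative decomposition, same cost).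

-- ===== PORT A =====
def solve (n : Int) (m : Int) (sings : List (List Int)) : Int :=
  (PySem.List.pyRange 0 m 1).foldl (fun res i =>
    (PySem.List.pyRange (i+1) m 1).foldl (fun res j =>
      max res ((PySem.List.pyRange 0 n 1).foldl
        (fun tmp line =>
          tmp + max (PySem.List.pyGetD (PySem.List.pyGetD sings line []) i 0)
                    (PySem.List.pyGetD (PySem.List.pyGetD sings line []) j 0)) 0)) res) 0

-- ===== PORT B =====
def solve_alt (n : Int) (m : Int) (sings : List (List Int)) : Int :=
  let pairs := (PySem.List.pyRange 0 m 1).flatMap (fun i =>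
    (PySem.List.pyRange (i+1) m 1).map (fun j => (i, j)))
  let acc := (PySem.List.slice sings none (some (max n 0))).foldl (fun acc row =>
      (acc.zip pairs).map (fun ap =>
        ap.1 + max (PySem.List.pyGetD row ap.2.1 0) (PySem.List.pyGetD row ap.2.2 0)))
    (pairs.map (fun _ => (0 : Int)))
  acc.foldl (fun best v => max best v) 0

-- ===== PRECONDITION & SPEC =====
-- Pre_ excludes exactly the inputs on which Python A raises IndexError: when at least one
-- column pair exists (2 ≤ m), every scanned row index must exist and every scanned row
-- must have at least m columns.
def Pre_solve (n : Int) (m : Int) (sings : List (List Int)) : Prop :=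
  2 ≤ m → n ≤ (sings.length : Int) ∧ ∀ row ∈ sings.take n.toNat, m ≤ (row.length : Int)
instance (n : Int) (m : Int) (sings : List (List Int)) : Decidable (Pre_solve n m sings) := by unfold Pre_solve; infer_instance
def pvWitness_solve : Int × Int × List (List Int) := (2, 2, [[1, 2], [3, -4]])
def Spec_solve (n : Int) (m : Int) (sings : List (List Int)) (out : Int) : Prop := out = solve_alt n m sings
instance (n : Int) (m : Int) (sings : List (List Int)) (out : Int) : Decidable (Spec_solve n m sings out) := by unfold Spec_solve; infer_instance

-- ===== CLAIM (what is proved, stated in full; the proofs are below) =====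
def Claim_equal_solve : Prop := ∀ (n : Int) (m : Int) (sings : List (List Int)), Dom_solve n m sings → Pre_solve n m sings → Spec_solve n m sings (solve n m sings)

-- ===== LEMMAS AND PROOFS =====

-- mapping over (map c pairs) zipped with pairs is a single map over pairs
theorem pv_zip_map_map {a b : Type} (pairs : List a) (c : a → b) (f : b → a → b) :
    ((pairs.map c).zip pairs).map (fun ap => f ap.1 ap.2)
      = pairs.map (fun p => f (c p) p) := by
  induction pairs with
  | nil => simp
  | cons p ps ih => simp [ih]

-- B's row loop keeps, for every pair p, the running sum of h over the rows seen so far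
theorem pv_fold_table {g a : Type} (L : List g) (pairs : List a)
    (h : g → a → Int) (c : a → Int) :
    L.foldl (fun acc row => (acc.zip pairs).map (fun ap => ap.1 + h row ap.2)) (pairs.map c)
      = pairs.map (fun p => L.foldl (fun t row => t + h row p) (c p)) := by
  induction L generalizing c with
  | nil => simp
  | cons x L ih =>
    simp only [List.foldl_cons]
    rw [pv_zip_map_map pairs c (fun v p => v + h x p), ih (fun p => c p + h x p)]

-- A's nested pair loops are one fold over the flattened pair list
theorem pv_nested_max (outer : List Int) (inner : Int → List Int)
    (t : Int → Int → Int) (r0 : Int) :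
    outer.foldl (fun res i => (inner i).foldl (fun r j => max r (t i j)) res) r0
      = (outer.flatMap (fun i => (inner i).map (fun j => (i, j)))).foldl
          (fun r p => max r (t p.1 p.2)) r0 := by
  induction outer generalizing r0 with
  | nil => simp
  | cons x os ih =>
    simp only [List.foldl_cons, List.flatMap_cons, List.foldl_append, List.foldl_map]
    rw [ih]

-- under Pre_, the sliced row list B iterates is exactly the rows A indexes
theorem pv_rows (n : Int) (sings : List (List Int)) (hn : n ≤ (sings.length : Int)) :
    PySem.List.slice sings none (some (max n 0))
      = (PySem.List.pyRange 0 n 1).map (fun line => PySem.List.pyGetD sings line []) := by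
  by_cases h : n ≤ 0
  · rw [PySem.List.pyRange_one_eq_nil h, show max n 0 = 0 from by omega,
        PySem.List.slice_to sings (by omega)]
    simp
  · rw [show max n 0 = n from by omega, PySem.List.slice_to sings (by omega)]
    apply List.ext_getElem
    · simp [PySem.List.length_pyRange_one]
      omega
    · intro k h1 h2
      simp only [List.getElem_map, PySem.List.getElem_pyRange_one, List.getElem_take]
      have hk : (k : Int) < (sings.length : Int) := by
        simp at h1
        omega
      rw [PySem.List.pyGetD_eq_getElem sings [] (by omega) (by omega)]
      simp

-- composition of the steps, stated abstractly so the final instantiation is one defeq check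
theorem pv_main (outer : List Int) (inner : Int → List Int) {g : Type}
    (lines : List Int) (rows : List g)
    (ga : Int → Int → Int) (gb : g → Int → Int)
    (hpt : ∀ i j, i ∈ outer → j ∈ inner i →
      lines.foldl (fun t line => t + max (ga line i) (ga line j)) 0
        = rows.foldl (fun t row => t + max (gb row i) (gb row j)) 0) :
    outer.foldl (fun res i => (inner i).foldl (fun r j =>
        max r (lines.foldl (fun t line => t + max (ga line i) (ga line j)) 0)) res) 0
      = (rows.foldl (fun acc row =>
            (acc.zip (outer.flatMap (fun i => (inner i).map (fun j => (i, j))))).map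
              (fun ap => ap.1 + max (gb row ap.2.1) (gb row ap.2.2)))
          ((outer.flatMap (fun i => (inner i).map (fun j => (i, j)))).map (fun _ => (0 : Int)))).foldl
          (fun best v => max best v) 0 := by
  rw [pv_nested_max outer inner (fun i j =>
        lines.foldl (fun t line => t + max (ga line i) (ga line j)) 0) 0,
      pv_fold_table rows
        (outer.flatMap (fun i => (inner i).map (fun j => (i, j))))
        (fun row p => max (gb row p.1) (gb row p.2)) (fun _ => (0 : Int)),
      List.foldl_map]
  apply PySem.List.foldl_congr_mem
  intro acc p hp
  obtain ⟨i, hi, hpj⟩ := List.mem_flatMap.mp hp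
  obtain ⟨j, hj, rfl⟩ := List.mem_map.mp hpj
  exact congrArg (fun z => max acc z) (hpt i j hi hj)

-- ===== VERDICT (by name: the statement is the Claim_ definition above) =====
theorem solve_spec : Claim_equal_solve := by
  intro n m sings _ hpre
  show solve n m sings = solve_alt n m sings
  refine pv_main (PySem.List.pyRange 0 m 1) (fun i => PySem.List.pyRange (i + 1) m 1)
    (PySem.List.pyRange 0 n 1) (PySem.List.slice sings none (some (max n 0)))
    (fun line idx => PySem.List.pyGetD (PySem.List.pyGetD sings line []) idx 0)
    (fun row idx => PySem.List.pyGetD row idx 0) ?_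
  intro i j hi hj
  rw [PySem.List.mem_pyRange_one] at hi hj
  have hn : n ≤ (sings.length : Int) := (hpre (by omega)).1
  rw [pv_rows n sings hn, List.foldl_map]
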